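-- pv_equiv track=rewrite | github.com/loganturske/AI-Module5 | lturske1.py | get_individuals
-- ===== SOURCE A (Python) =====
-- def get_individuals(params, pop):
--     individuals = [pop[i:i + 10] for i in range(0, len(pop), 10)]
--     for index, individual in enumerate(individuals):
--         temp_str = ''
--         for bit in individual:
--             temp_str += str(bit)
--         individuals[index] = temp_str
--     return individuals
-- ===== SOURCE B (Python) =====
-- def get_individuals(params, pop):
--     groups = []
--     for index, bit in enumerate(pop):
--         if index % 10 == 0:
--             groups.append('')
--         groups[-1] += str(bit)
--     return groups
-- ===== Notes on version B (the rewrite author's own statement) =====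
-- stated objective: alternative
-- what changed: A first builds all 10-element slices with a range-stepped comprehension and then rewrites each slot by an inner concatenation loop; B makes one flat pass over enumerate(pop), opening a new empty group string whenever the index is a multiple of 10 and concatenating str(bit) onto the current last string.
import Mathlib
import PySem

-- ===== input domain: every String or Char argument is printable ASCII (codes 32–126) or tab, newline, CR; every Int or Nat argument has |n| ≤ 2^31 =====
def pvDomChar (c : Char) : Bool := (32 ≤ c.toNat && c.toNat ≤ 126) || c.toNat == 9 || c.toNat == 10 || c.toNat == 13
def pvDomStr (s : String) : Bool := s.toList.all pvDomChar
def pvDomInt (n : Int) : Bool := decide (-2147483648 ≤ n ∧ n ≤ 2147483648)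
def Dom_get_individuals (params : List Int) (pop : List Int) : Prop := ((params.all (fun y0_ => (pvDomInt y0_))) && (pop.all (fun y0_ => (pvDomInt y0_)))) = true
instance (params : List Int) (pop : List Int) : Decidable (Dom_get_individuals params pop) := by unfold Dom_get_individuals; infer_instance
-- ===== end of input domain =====

-- B replaces A's slice-then-concatenate two-phase comprehension by a single flat pass that
-- opens a new group string whenever the index is a multiple of 10 (objective: alternative).

-- ===== PORT A =====
-- individuals = [pop[i:i + 10] for i in range(0, len(pop), 10)]; then each slot is
-- overwritten by the concatenation of str(bit) over its slice (ported as a second map).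
def get_individuals (params : List Int) (pop : List Int) : List String :=
  let individuals : List (List Int) :=
    (PySem.List.pyRange 0 (pop.length : Int) 10).map
      (fun i => PySem.List.slice pop (some i) (some (i + 10)))
  individuals.map (fun individual =>
    individual.foldl (fun temp_str bit => temp_str ++ PySem.Int.toStr bit) "")

-- ===== PORT B =====
-- loop body of Source B: if index % 10 == 0: groups.append(''); groups[-1] += str(bit)
def pvStepB (groups : List String) (p : Int × Int) : List String :=
  let groups := if PySem.Int.mod p.1 10 = 0 then groups ++ [""] else groups
  PySem.List.pySetD groups (-1) (PySem.List.pyGetD groups (-1) "" ++ PySem.Int.toStr p.2)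

def get_individuals_alt (params : List Int) (pop : List Int) : List String :=
  (PySem.List.enumerate pop 0).foldl pvStepB []

-- ===== PRECONDITION & SPEC =====
def Spec_get_individuals (params : List Int) (pop : List Int) (out : List String) : Prop := out = get_individuals_alt params pop
instance (params : List Int) (pop : List Int) (out : List String) : Decidable (Spec_get_individuals params pop out) := by unfold Spec_get_individuals; infer_instance

-- ===== CLAIM (what is proved, stated in full; the proofs are below) =====
def Claim_equal_get_individuals : Prop := ∀ (params : List Int) (pop : List Int), Dom_get_individuals params pop → Spec_get_individuals params pop (get_individuals params pop)

-- ===== LEMMAS AND PROOFS =====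

/-- The chunks of 10 that both programs group `pop` into. -/
def pvChunks (xs : List Int) : List (List Int) :=
  if xs = [] then [] else xs.take 10 :: pvChunks (xs.drop 10)
termination_by xs.length
decreasing_by
  rename_i h
  have : xs.length ≠ 0 := fun hl => h (List.eq_nil_of_length_eq_zero hl)
  simp [List.length_drop]; omega

/-- Concatenation of the decimal strings of a chunk. -/
def pvCat (xs : List Int) : String :=
  xs.foldl (fun s b => s ++ PySem.Int.toStr b) ""

theorem pvCat_foldl (xs : List Int) (s0 : String) :
    xs.foldl (fun s b => s ++ PySem.Int.toStr b) s0 = s0 ++ pvCat xs := by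
  induction xs generalizing s0 with
  | nil => simp [pvCat]
  | cons x t ih =>
    show List.foldl _ (s0 ++ PySem.Int.toStr x) t = _
    rw [ih]
    have h2 : pvCat (x :: t) = ("" ++ PySem.Int.toStr x) ++ pvCat t := by
      show List.foldl _ ("" ++ PySem.Int.toStr x) t = _
      rw [ih]
    rw [h2]
    simp [String.append_assoc]

theorem pvCat_cons (x : Int) (t : List Int) :
    pvCat (x :: t) = PySem.Int.toStr x ++ pvCat t := by
  have h2 : pvCat (x :: t) = ("" ++ PySem.Int.toStr x) ++ pvCat t := by
    show List.foldl _ ("" ++ PySem.Int.toStr x) t = _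
    rw [pvCat_foldl]
  simpa using h2

-- setting groups[-1] on a nonempty list replaces the last element
theorem pvSet_last (acc : List String) (s v : String) :
    PySem.List.pySetD (acc ++ [s]) (-1) v = acc ++ [v] := by
  simp [PySem.List.pySetD, PySem.List.pySet?, PySem.List.pyIdx?]

theorem pvStepB_zero (acc : List String) (i x : Int) (h : PySem.Int.mod i 10 = 0) :
    pvStepB acc (i, x) = acc ++ [PySem.Int.toStr x] := by
  simp only [pvStepB, h, if_pos]
  rw [PySem.List.pyGetD_neg_one_append_singleton, pvSet_last]
  simp

theorem pvStepB_pos (acc : List String) (s : String) (i x : Int)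
    (h : PySem.Int.mod i 10 ≠ 0) :
    pvStepB (acc ++ [s]) (i, x) = acc ++ [s ++ PySem.Int.toStr x] := by
  simp only [pvStepB, h, if_false]
  rw [PySem.List.pyGetD_neg_one_append_singleton, pvSet_last]

theorem pvMod_ten (k r : Nat) (h : r < 10) :
    PySem.Int.mod ((10 * k : Nat) + (r : Nat) : Int) 10 = (r : Int) := by
  rw [PySem.Int.mod_eq_emod_of_pos (by norm_num)]
  omega

theorem pvEnum_append {α : Type} (as bs : List α) (s : Int) :
    PySem.List.enumerate (as ++ bs) s
      = PySem.List.enumerate as s ++ PySem.List.enumerate bs (s + as.length) := by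
  induction as generalizing s with
  | nil => simp [PySem.List.enumerate]
  | cons a t ih =>
    simp [PySem.List.enumerate, ih, List.length_cons]
    ring_nf

-- inside a chunk: indices 10k+r, …, never hit a multiple of 10, so the last string grows
theorem pvB_inner (xs : List Int) (k r : Nat) (hr : 1 ≤ r) (hlen : r + xs.length ≤ 10)
    (acc : List String) (s : String) :
    (PySem.List.enumerate xs ((10 * k + r : Nat) : Int)).foldl pvStepB (acc ++ [s])
      = acc ++ [s ++ pvCat xs] := by
  induction xs generalizing r s with
  | nil => simp [PySem.List.enumerate, pvCat]
  | cons x t ih =>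
    simp only [PySem.List.enumerate, List.foldl_cons]
    have hmod : PySem.Int.mod ((10 * k + r : Nat) : Int) 10 = (r : Int) := by
      have : ((10 * k + r : Nat) : Int) = ((10 * k : Nat) : Int) + (r : Nat) := by push_cast; ring
      rw [this, pvMod_ten k r (by simp at hlen; omega)]
    rw [pvStepB_pos acc s _ x (by rw [hmod]; exact_mod_cast (by omega : (r : Int) ≠ 0))]
    have hcast : ((10 * k + r : Nat) : Int) + 1 = ((10 * k + (r + 1) : Nat) : Int) := by
      push_cast; ring
    rw [hcast, ih (r + 1) (by omega) (by simp at hlen ⊢; omega)]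
    rw [pvCat_cons, String.append_assoc]

-- the whole loop, chunk by chunk, starting at any multiple of 10
theorem pvB_outer (n : Nat) : ∀ (xs : List Int), xs.length = n → ∀ (k : Nat) (acc : List String),
    (PySem.List.enumerate xs ((10 * k : Nat) : Int)).foldl pvStepB acc
      = acc ++ (pvChunks xs).map pvCat := by
  induction n using Nat.strong_induction_on with
  | _ n IH =>
    intro xs hn k acc
    match xs with
    | [] => simp [PySem.List.enumerate, pvChunks]
    | y :: t =>
      simp only [PySem.List.enumerate, List.foldl_cons]
      rw [pvStepB_zero acc _ y (by simpa using pvMod_ten k 0 (by norm_num))]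
      have hchunks : pvChunks (y :: t) = (y :: t.take 9) :: pvChunks (t.drop 9) := by
        rw [pvChunks, if_neg (by simp), show (10 : Nat) = 9 + 1 from rfl,
          List.take_succ_cons, List.drop_succ_cons]
      rw [hchunks]
      conv_lhs => rw [show t = t.take 9 ++ t.drop 9 from (List.take_append_drop 9 t).symm]
      rw [pvEnum_append, List.foldl_append]
      have hc1 : ((10 * k : Nat) : Int) + 1 = ((10 * k + 1 : Nat) : Int) := by push_cast; ring
      rw [hc1, pvB_inner (t.take 9) k 1 (by omega)
            (by have := List.length_take_le 9 t; omega) acc (PySem.Int.toStr y)]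
      by_cases ht : t.length < 9
      · have hd : t.drop 9 = [] := List.drop_eq_nil_of_le (by omega)
        rw [hd]
        simp [PySem.List.enumerate, pvChunks, pvCat_cons]
      · have hlen9 : (t.take 9).length = 9 := by simp; omega
        have hc2 : ((10 * k + 1 : Nat) : Int) + ((t.take 9).length : Int)
            = ((10 * (k + 1) : Nat) : Int) := by rw [hlen9]; push_cast; ring
        rw [hc2, IH (t.drop 9).length (by simp at hn ⊢; omega) (t.drop 9) rfl (k + 1)]
        simp [pvCat_cons]

-- A side: the slice comprehension produces exactly the chunks
theorem pvA_range (n : Nat) : ∀ (xs : List Int), xs.length = n →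
    (List.range ((n + 9) / 10)).map (fun k => (xs.drop (10 * k)).take 10) = pvChunks xs := by
  induction n using Nat.strong_induction_on with
  | _ n IH =>
    intro xs hn
    match hx : xs with
    | [] =>
      have : n = 0 := by simp at hn; omega
      subst this
      simp [pvChunks]
    | y :: t =>
      have hn1 : 1 ≤ n := by simp at hn; omega
      have hsplit : (n + 9) / 10 = (n - 1) / 10 + 1 := by
        have : n + 9 = (n - 1) + 10 := by omega
        rw [this, Nat.add_div_right _ (by norm_num)]
      rw [hsplit, List.range_succ_eq_map, List.map_cons, List.map_map]
      have hm : ((y :: t).drop ((10 : Nat) * 0)).take 10 = (y :: t).take 10 := by simp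
      rw [hm]
      have hrec : ((y :: t).drop 10).length = n - 10 := by simp at hn ⊢; omega
      have hcnt : ((n - 10) + 9) / 10 = (n - 1) / 10 := by
        by_cases h10 : 10 ≤ n
        · congr 1; omega
        · rw [Nat.div_eq_of_lt (by omega), Nat.div_eq_of_lt (by omega)]
      have := IH (n - 10) (by omega) ((y :: t).drop 10) hrec
      rw [hcnt] at this
      rw [pvChunks, if_neg (by simp)]
      rw [← this]
      congr 1
      apply List.map_congr_left
      intro k _
      simp only [Function.comp_apply, Nat.succ_eq_add_one, List.drop_drop]
      congr 2
      omega

theorem pvA_eq (xs : List Int) :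
    (PySem.List.pyRange 0 (xs.length : Int) 10).map
        (fun i => PySem.List.slice xs (some i) (some (i + 10)))
      = pvChunks xs := by
  rw [PySem.List.pyRange_of_pos 0 (xs.length : Int) (by norm_num), List.map_map]
  by_cases h0 : xs = []
  · subst h0; simp [pvChunks]
  · have hlen : 0 < xs.length := List.length_pos_of_ne_nil h0
    rw [if_pos (by exact_mod_cast hlen)]
    have hcnt : (((xs.length : Int) - 0 + 10 - 1) / 10).toNat = (xs.length + 9) / 10 := by
      have : ((xs.length : Int) - 0 + 10 - 1) = ((xs.length + 9 : Nat) : Int) := by push_cast; ring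
      rw [this, show (10 : Int) = ((10 : Nat) : Int) from rfl, ← Int.natCast_div, Int.toNat_natCast]
    rw [hcnt, ← pvA_range xs.length xs rfl]
    congr 1
    funext k
    simp only [Function.comp_apply]
    have h1 : (0 : Int) + 10 * (k : Int) = ((10 * k : Nat) : Int) := by push_cast; ring
    have h2 : (0 : Int) + 10 * (k : Int) + 10 = ((10 * k : Nat) : Int) + ((10 : Nat) : Int) := by
      push_cast; ring
    rw [h2, h1, PySem.List.slice_natCast_add xs (10 * k) 10]

-- ===== VERDICT (by name: the statement is the Claim_ definition above) =====
theorem get_individuals_spec : Claim_equal_get_individuals := by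
  intro params pop _
  unfold Spec_get_individuals get_individuals get_individuals_alt
  simp only
  rw [pvA_eq pop]
  have hb := pvB_outer pop.length pop rfl 0 []
  simp only [Nat.mul_zero, Nat.cast_zero, List.nil_append] at hb
  rw [hb]
  rfl
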